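/- GENERATED by tools/from_farm_form.py from prooffarm-gif/accepted/DGifSlurp.11/Lemmas.lean (a worked proof of the farm's unit `DGifSlurp.11`,
   accepted by the verdict) — do not edit. -/
import Gif.Spec.Units.DGifSlurp_11
import Gif.Spec.AllSegs

/-!
  Lemmas for the unit `DGifSlurp.11` (the head of the sub-block loop of DGifSlurp, 10A8A2H … 10A8EDH; dgif_lib.c:1290-1306): the
  segment is walked in FOUR STEPS that meet at three private cuts (the two calls' return addresses and the check call), each with
  a private assertion = `DGifSlurp.At` + what is live there.

      sl11_env_at_call   `Env` at a callee's entry for the PRESENT heap and forest (`Env.at_call` asks the entry's)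
      sl11_at_move       `At` along instructions that store nothing
      sl11_AtRet20       the assertion at 10A8AFH (ret20): DGifGetExtensionNext has returned
      sl11_AtChk14       the assertion at 10A8CAH (chk14): GIF_OK, `ExtData = pv + 88`
      sl11_AtRet22       the assertion at 10A8E7H (ret22): GifAddExtensionBlock has returned
      sl11_seg_call1     10A8A2H … ret20:                   `ExtHead` → `sl11_AtRet20`
      sl11_seg_mid       ret20 … chk14 | 10A81FH | 10A8EDH: `sl11_AtRet20` → `sl11_AtChk14` ∨ `Rec` ∨ `Exit`
      sl11_seg_call2     chk14 … ret22:                     `sl11_AtChk14` → `∃ H' F', sl11_AtRet22`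
      sl11_seg_tail      ret22 … 10A8A2H | 10A8EDH:         `sl11_AtRet22` → `ExtHead` (smaller measure) ∨ `Exit`
-/

open X86 X86.User Asan ProgX.Base ProgX.Base.Spec Gif.Spec

set_option maxRecDepth 4000
set_option maxHeartbeats 4000000

namespace Gif.Spec.DGifSlurp_11

/-- **`Env` at the entry of a callee of DGifSlurp's body, for the PRESENT heap `Hc` and forest `Fc`** (`Env.at_call` of
Gif/Spec/FrameCarry.lean asks the entry's heap and forest; here they changed): the static facts of `HeapPre` and the context come
from the entry's environment `henv`, the region from `SameRegion H Hc`, the invariants from the body's `At.inv` / `At.ok`; the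
callee's entry state `s` differs from `mem` by stack stores below `top`. -/
theorem sl11_env_at_call {H Hc : Heap} {rest : List Obj} {frames : List (Nat × FrameLayout)} {F Fc : Forest} {R : Rd} {e s : State}
    {base top lo : Nat} {Fl : FrameLayout} {mem : Mem} (henv : Env H rest frames F R e) (hreg : SameRegion H Hc)
    (hinv : HeapInv Hc rest ((base, Fl) :: frames) top mem) (hok : GifOK Hc Fc R mem)
    (hs : Mem.SameExcept [⟨lo, top⟩] mem s.mem) (hlo : 0x700000 ≤ lo) (htop : top ≤ (e.reg .rsp).toNat + 8)
    (hsp : (s.reg .rsp).toNat + 8 ≤ top) (h8 : (s.reg .rsp).toNat % 8 = 0) (hlo' : 0x700000 ≤ (s.reg .rsp).toNat + 8) :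
    Env Hc rest ((base, Fl) :: frames) Fc R s := by
  have hcur := henv.ctx.cursor_range henv.heap.inv.shadow
  have hhi := hinv.shadow.stack.hi
  have hoff := hinv.heap.offStack
  have hroom := hinv.heap.room
  have hun : ShadowUntouched mem s.mem := by
    apply hs.eqOn
    intro w hw
    have e := List.mem_singleton.mp hw
    rw [e]
    simp only
    omega
  have hinv' : HeapInv Hc rest ((base, Fl) :: frames) ((s.reg .rsp).toNat + 8) s.mem := by
    refine (hinv.sameExcept hun hs ?_).lower hsp (by omega) hlo'
    intro w hw
    have e := List.mem_singleton.mp hw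
    rw [e]
    left
    simp only
    omega
  refine ⟨⟨hinv', hreg.1.trans henv.heap.base, hreg.2.trans henv.heap.limit, henv.heap.text, henv.heap.offText⟩,
    henv.ctx.push base Fl, ?_⟩
  apply hok.sameExcept hinv.heap ⟨hcur.1, hcur.2.1⟩ hs
  intro w hw
  have e := List.mem_singleton.mp hw
  rw [e]
  apply Loose.stack hinv.heap
  · simp only
    omega
  · simp only
    omega
  · simp only
    omega

/-- **At 10A8AFH (ret20), `DGifGetExtensionNext(gif, &ExtData)` has returned**: `At` for the same heap and forest, every counted
image complete, `eax` is 0 or 1, the reader did not go back, and GIF_OK means `BlockPost` for the frame's object `ExtData`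
(`[RA − 88, RA − 80)`) against the head's measure `k`. -/
structure sl11_AtRet20 (H : Heap) (rest : List Obj) (frames : List (Nat × FrameLayout)) (F : Forest) (R : Rd) (Hc : Heap)
    (Fc : Forest) (m k : Nat) (u₀ e : State) (ret : Word) (v : State) : Prop where
  at_ : DGifSlurp.At Gif.L.DGifSlurp.ret20 H rest frames F R Hc Fc u₀ e ret v
  complete : Fc.Complete
  bool : IsBool v
  le : rem R v.mem ≤ k
  lt : k < m
  block : (v.reg .rax).toNat = 1 →
    (rd v.mem ((e.reg .rsp).toNat - 88) 8 = 0 ∧ rem R v.mem + 1 = k) ∨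
    (rd v.mem ((e.reg .rsp).toNat - 88) 8 = Fc.pv + 88 ∧ 1 ≤ rd v.mem (Fc.pv + 88) 1 ∧ rd v.mem (Fc.pv + 88) 1 ≤ 255 ∧
      rem R v.mem + 1 + rd v.mem (Fc.pv + 88) 1 = k)

/-- **10A8A2H … the call of DGifGetExtensionNext … 10A8AFH (ret20)** (dgif_lib.c:1291): `rsi = rsp + 40H = RA − 88` (the frame's
object `ExtData` at base + 64: `OutPtr.own`), `rdi = rbp = gif`; the callee's contract for the present heap and forest and the
frame list with the own frame in front. -/
theorem sl11_seg_call1 (Lay : Layout) (hLay : Lay.hi = 0x1000000) (μ : Microarch) (hμ : UserX.MicroOK μ) (u₀ : State)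
    (hcode : HasCodeNat Lay u₀ Gif.L.DGifSlurp.entry Gif.Code.code_DGifSlurp.nat Gif.L.DGifSlurp.size)
    (H : Heap) (rest : List Obj) (frames : List (Nat × FrameLayout)) (F : Forest) (R : Rd) (Hc : Heap) (Fc : Forest) (m k : Nat)
    (e : State) (ret : Word)
    (h_next : Calls Lay μ ProgX.Base.WayInv (ProgX.Base.conv u₀) Gif.L.DGifGetExtensionNext.entry
      (Gif.Spec.DGifGetExtensionNext.spec Hc rest (DGifSlurp.framesIn frames e) Fc R))
    (v : State) (hat : DGifSlurp.ExtHead H rest frames F R Hc Fc m k u₀ e ret v) :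
    ReachVia Lay μ ProgX.Base.WayInv v (sl11_AtRet20 H rest frames F R Hc Fc m k u₀ e ret) := by
  obtain ⟨⟨hcore, hregion, hgif, hpv, hinv, hok⟩, hcomplete, hmeas, hlt⟩ := hat
  have he := hcore.entry
  v_entry he
  obtain ⟨henv, hrdi, hcompl0⟩ := hcore.pre
  have w_rip := hcore.rip
  have c_rsp : v.reg .rsp = e.reg .rsp - 152 := hcore.rsp
  have c_rbp : v.reg .rbp = e.reg .rdi := hcore.rbp
  have w_kept : RegsKept [.rsp] v v := RegsKept.refl _ _
  have w_eq : Mem.EqOn ProgX.Base.L.textLo ProgX.Base.L.textHi u₀.mem v.mem := ProgX.Base.conv_code_eqOn hcore.code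
  have hdf := (show abiInv _ from hcore.abi).1
  have hmx := (show abiInv _ from hcore.abi).2
  have hsse := ProgX.Base.sseOK_of_abiInv hcore.abi
  have k_r15 : v.mem.readLE (e.reg .rsp - 8) 8 = (e.reg .r15).toNat := hcore.slot_r15
  have k_r14 : v.mem.readLE (e.reg .rsp - 16) 8 = (e.reg .r14).toNat := hcore.slot_r14
  have k_r13 : v.mem.readLE (e.reg .rsp - 24) 8 = (e.reg .r13).toNat := hcore.slot_r13
  have k_r12 : v.mem.readLE (e.reg .rsp - 32) 8 = (e.reg .r12).toNat := hcore.slot_r12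
  have k_rbp : v.mem.readLE (e.reg .rsp - 40) 8 = (e.reg .rbp).toNat := hcore.slot_rbp
  have k_rbx : v.mem.readLE (e.reg .rsp - 48) 8 = (e.reg .rbx).toNat := hcore.slot_rbx
  have k_ra : UInt64.ofNat (v.mem.readLE (e.reg .rsp) 8) = ret := hcore.slot_ra
  have hsame : Mem.SameExcept
    [⟨(e.reg .rsp).toNat - 848, (e.reg .rsp).toNat⟩,
     shadowSpan ((e.reg .rsp).toNat - 152) ((e.reg .rsp).toNat - 56),
     ⟨0x800000, 0x1000020⟩,
     ⟨R.cur, R.cur + 8⟩] e.mem v.mem := hcore.same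
  have hcur := henv.ctx.cursor_range henv.heap.inv.shadow
  have hbase : Hc.base = 0x800000 := hregion.1.trans henv.heap.base
  -- where gif and pv are, as numbers
  have hgin := hok.owns.inside hinv.heap (o := (Fc.gif, 120)) List.mem_cons_self
  have hpin := hok.owns.inside hinv.heap (o := (Fc.pv, 24936)) (List.mem_cons_of_mem _ List.mem_cons_self)
  simp only at hgin hpin
  rw [hbase] at hgin hpin
  have hg1 := hgin.1
  have hg2 := hgin.2.2.2.2
  have hp1 := hpin.1
  have hp2 := hpin.2.2.2.2
  clear hgin hpin
  u_walk hcode [hμ.vendor] until [Gif.L.DGifSlurp.ret20] span [ProgX.Base.L.textLo, ProgX.Base.L.textHi] side (v_side)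
  case call_inv =>
    v_inv
  case pre_10a8aa =>
    have hs : Mem.SameExcept [⟨(e.reg .rsp).toNat - 848, (e.reg .rsp).toNat - 152⟩] v.mem s_10a8aa.mem := by
      rw [w_mem]
      u_same
    have henv' : Env Hc rest (DGifSlurp.framesIn frames e) Fc R s_10a8aa := by
      refine sl11_env_at_call henv hregion hinv hok hs (by omega) (by omega) ?_ ?_ ?_
      · rw [w_rsp]
        u_omega
      · rw [w_rsp]
        u_omega
      · rw [w_rsp]
        u_omega
    -- the out-pointer is the frame's object `ExtData` (`[rsp + 0x40]` = base + 64, 8 bytes)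
    have ho : (⟨(e.reg .rsp).toNat - 152 + 64, 8, .stack⟩ : Obj) ∈
        Gif.Frames.DGifSlurp.objsAt ((e.reg .rsp).toNat - 152) := by
      apply List.mem_cons_of_mem
      apply List.mem_cons_of_mem
      exact List.mem_cons_self
    have hsz : Gif.Frames.DGifSlurp.size = 96 := rfl
    have hb : (e.reg .rsp).toNat - 152 + Gif.Frames.DGifSlurp.size ≤ (e.reg .rsp).toNat + 8 := by
      rw [hsz]
      omega
    have hout : OutPtr Hc rest (DGifSlurp.framesIn frames e) Fc R ((e.reg .rsp).toNat - 152 + 64) 8 :=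
      OutPtr.own henv.heap henv.ctx hinv hb ho
    have ersi : (s_10a8aa.reg .rsi).toNat = (e.reg .rsp).toNat - 152 + 64 := by
      rw [w_rsi]
      u_omega
    refine ⟨henv', ?_, ?_⟩
    · rw [w_rdi, hgif]
      exact hrdi
    · rw [ersi]
      exact hout
  -- 0x10a8af (ret20): DGifGetExtensionNext HAS RETURNED
  obtain ⟨hback, hbool, hblock⟩ := w_post
  have hs0 : Mem.SameExcept [⟨(e.reg .rsp).toNat - 848, (e.reg .rsp).toNat - 152⟩] v.mem s_10a8aa.mem := by
    rw [w_mem_10a8aa]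
    u_same
  have hrem0 : rem R s_10a8aa.mem = k := by
    rw [← hmeas]
    apply rem_sameExcept hs0 (by omega)
    intro w hw
    have e := List.mem_singleton.mp hw
    rw [e]
    simp only
    omega
  have e_top : (s_10a8aa.reg .rsp).toNat + 8 = (e.reg .rsp).toNat - 152 := by
    rw [w_rsp_10a8aa]
    u_omega
  have ersi : (s_10a8aa.reg .rsi).toNat = (e.reg .rsp).toNat - 88 := by
    rw [w_rsi_10a8aa]
    u_omega
  -- the callee's footprint in terms of `v`
  v_after_call w_rsp_10a8aa w_mem_10a8aa
  simp only [ersi] at w_same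
  -- the slots and the return address: over the pushed return address, then through the callee's footprint
  have hp15 : s_10a8aa.mem.readLE (e.reg .rsp - 8) 8 = (e.reg .r15).toNat := by
    rw [w_mem_10a8aa]
    u_frame k_r15
  rw [w_mem_10a8aa] at hp15
  have hs15 : s_10a8aar.mem.readLE (e.reg .rsp - 8) 8 = (e.reg .r15).toNat := by u_frame hp15
  have hp14 : s_10a8aa.mem.readLE (e.reg .rsp - 16) 8 = (e.reg .r14).toNat := by
    rw [w_mem_10a8aa]
    u_frame k_r14
  rw [w_mem_10a8aa] at hp14
  have hs14 : s_10a8aar.mem.readLE (e.reg .rsp - 16) 8 = (e.reg .r14).toNat := by u_frame hp14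
  have hp13 : s_10a8aa.mem.readLE (e.reg .rsp - 24) 8 = (e.reg .r13).toNat := by
    rw [w_mem_10a8aa]
    u_frame k_r13
  rw [w_mem_10a8aa] at hp13
  have hs13 : s_10a8aar.mem.readLE (e.reg .rsp - 24) 8 = (e.reg .r13).toNat := by u_frame hp13
  have hp12 : s_10a8aa.mem.readLE (e.reg .rsp - 32) 8 = (e.reg .r12).toNat := by
    rw [w_mem_10a8aa]
    u_frame k_r12
  rw [w_mem_10a8aa] at hp12
  have hs12 : s_10a8aar.mem.readLE (e.reg .rsp - 32) 8 = (e.reg .r12).toNat := by u_frame hp12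
  have hpbp : s_10a8aa.mem.readLE (e.reg .rsp - 40) 8 = (e.reg .rbp).toNat := by
    rw [w_mem_10a8aa]
    u_frame k_rbp
  rw [w_mem_10a8aa] at hpbp
  have hsbp : s_10a8aar.mem.readLE (e.reg .rsp - 40) 8 = (e.reg .rbp).toNat := by u_frame hpbp
  have hpbx : s_10a8aa.mem.readLE (e.reg .rsp - 48) 8 = (e.reg .rbx).toNat := by
    rw [w_mem_10a8aa]
    u_frame k_rbx
  rw [w_mem_10a8aa] at hpbx
  have hsbx : s_10a8aar.mem.readLE (e.reg .rsp - 48) 8 = (e.reg .rbx).toNat := by u_frame hpbx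
  have hpra : UInt64.ofNat (s_10a8aa.mem.readLE (e.reg .rsp) 8) = ret := by
    rw [w_mem_10a8aa]
    u_frame k_ra
  rw [w_mem_10a8aa] at hpra
  have hsra : UInt64.ofNat (s_10a8aar.mem.readLE (e.reg .rsp) 8) = ret := by u_frame hpra
  -- the footprint since the entry
  have hsame1 : Mem.SameExcept
    [⟨(e.reg .rsp).toNat - 848, (e.reg .rsp).toNat⟩,
     shadowSpan ((e.reg .rsp).toNat - 152) ((e.reg .rsp).toNat - 56),
     ⟨0x800000, 0x1000020⟩,
     ⟨R.cur, R.cur + 8⟩] e.mem s_10a8aar.mem := by u_same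
  have hinv1 : HeapInv Hc rest (DGifSlurp.framesIn frames e) ((e.reg .rsp).toNat - 152) s_10a8aar.mem := by
    rw [← e_top]
    exact hback.inv
  have hcore1 : DGifSlurp.Core Gif.L.DGifSlurp.ret20 H rest frames F R u₀ e ret s_10a8aar := {
    entry := hcore.entry
    pre := hcore.pre
    rip := w_rip
    rsp := w_rsp
    rbp := (w_kept.get .rbp rfl).trans c_rbp
    r14 := (w_kept.get .r14 rfl).trans hcore.r14
    slot_r15 := hs15
    slot_r14 := hs14
    slot_r13 := hs13
    slot_r12 := hs12
    slot_rbp := hsbp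
    slot_rbx := hsbx
    slot_ra := hsra
    rem := by
      have h1 := hback.rem
      have h2 := hcore.rem
      omega
    same := hsame1
    code := w_code
    abi := w_inv
  }
  refine ReachVia.done ?_
  exact {
    at_ := ⟨hcore1, hregion, hgif, hpv, hinv1, hback.ok⟩
    complete := hcomplete
    bool := hbool
    le := by
      have h1 := hback.rem
      omega
    lt := hlt
    block := by
      intro h1
      have hb := hblock h1
      unfold BlockPost at hb
      rw [ersi, hrem0] at hb
      exact hb
  }

/-- **`At` moves along instructions that store nothing**: the same memory, `rsp`, `rbp`, `r14` kept, the ABI's invariant. -/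
theorem sl11_at_move {cut cut' : Word} {H : Heap} {rest : List Obj} {frames : List (Nat × FrameLayout)} {F : Forest} {R : Rd}
    {Hc : Heap} {Fc : Forest} {u₀ e : State} {ret : Word} {v s : State}
    (hat : DGifSlurp.At cut H rest frames F R Hc Fc u₀ e ret v) (hrip : s.rip = cut') (hmem : s.mem = v.mem)
    (hrsp : s.reg .rsp = e.reg .rsp - 152) (hrbp : s.reg .rbp = v.reg .rbp) (hr14 : s.reg .r14 = v.reg .r14)
    (habi : (conv u₀).inv s) : DGifSlurp.At cut' H rest frames F R Hc Fc u₀ e ret s := by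
  obtain ⟨hcore, hregion, hgif, hpv, hinv, hok⟩ := hat
  have hcore1 : DGifSlurp.Core cut' H rest frames F R u₀ e ret s := {
    entry := hcore.entry
    pre := hcore.pre
    rip := hrip
    rsp := hrsp
    rbp := hrbp.trans hcore.rbp
    r14 := hr14.trans hcore.r14
    slot_r15 := by
      rw [hmem]
      exact hcore.slot_r15
    slot_r14 := by
      rw [hmem]
      exact hcore.slot_r14
    slot_r13 := by
      rw [hmem]
      exact hcore.slot_r13
    slot_r12 := by
      rw [hmem]
      exact hcore.slot_r12
    slot_rbp := by
      rw [hmem]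
      exact hcore.slot_rbp
    slot_rbx := by
      rw [hmem]
      exact hcore.slot_rbx
    slot_ra := by
      rw [hmem]
      exact hcore.slot_ra
    rem := by
      rw [hmem]
      exact hcore.rem
    same := by
      rw [hmem]
      exact hcore.same
    code := by
      rw [hmem]
      exact hcore.code
    abi := habi
  }
  refine ⟨hcore1, hregion, hgif, hpv, ?_, ?_⟩
  · rw [hmem]
    exact hinv
  · rw [hmem]
    exact hok

/-- **At 10A8CAH (chk14), before the check of `Buf[0]`** (dgif_lib.c:1302): `At` for the same heap and forest, every counted image
complete; `rbx = rdi = ExtData = pv + 88` (`&pv.Buf`), `r12 = pv + 89`; `Buf[0]` between 1 and 255, and the reader consumed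
`1 + Buf[0]` bytes of the head's measure `k`. -/
structure sl11_AtChk14 (H : Heap) (rest : List Obj) (frames : List (Nat × FrameLayout)) (F : Forest) (R : Rd) (Hc : Heap)
    (Fc : Forest) (m k : Nat) (u₀ e : State) (ret : Word) (v : State) : Prop where
  at_ : DGifSlurp.At Gif.L.DGifSlurp.chk14 H rest frames F R Hc Fc u₀ e ret v
  complete : Fc.Complete
  rbx : v.reg .rbx = UInt64.ofNat (Fc.pv + 88)
  rdi : v.reg .rdi = UInt64.ofNat (Fc.pv + 88)
  r12 : v.reg .r12 = UInt64.ofNat (Fc.pv + 88) + 1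
  len1 : 1 ≤ rd v.mem (Fc.pv + 88) 1
  len2 : rd v.mem (Fc.pv + 88) 1 ≤ 255
  adv : rem R v.mem + 1 + rd v.mem (Fc.pv + 88) 1 = k
  lt : k < m

/-- **10A8AFH (ret20) … 10A8CAH** (dgif_lib.c:1291-1303): `ebx = eax`; GIF_ERROR: to the epilogue; `rbx = ExtData`; NULL: the
record is done (10A81FH); otherwise `r12 = ExtData + 1`, `rdi = ExtData`, at the check call. No store. -/
theorem sl11_seg_mid (Lay : Layout) (hLay : Lay.hi = 0x1000000) (μ : Microarch) (hμ : UserX.MicroOK μ) (u₀ : State)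
    (hcode : HasCodeNat Lay u₀ Gif.L.DGifSlurp.entry Gif.Code.code_DGifSlurp.nat Gif.L.DGifSlurp.size)
    (H : Heap) (rest : List Obj) (frames : List (Nat × FrameLayout)) (F : Forest) (R : Rd) (Hc : Heap) (Fc : Forest) (m k : Nat)
    (e : State) (ret : Word)
    (v : State) (hat : sl11_AtRet20 H rest frames F R Hc Fc m k u₀ e ret v) :
    ReachVia Lay μ ProgX.Base.WayInv v (fun w =>
      sl11_AtChk14 H rest frames F R Hc Fc m k u₀ e ret w ∨
      DGifSlurp.Rec Gif.L.DGifSlurp.at_10a81f H rest frames F R Hc Fc m u₀ e ret w ∨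
      DGifSlurp.Exit H rest frames F R u₀ e ret w) := by
  obtain ⟨hat0, hcomplete, hbool, hle, hlt, hblock⟩ := hat
  have hcore := hat0.core
  have he := hcore.entry
  v_entry he
  have w_rip := hcore.rip
  have c_rsp : v.reg .rsp = e.reg .rsp - 152 := hcore.rsp
  obtain ⟨z, c_rax⟩ : ∃ z, v.reg .rax = z := ⟨_, rfl⟩
  rw [c_rax] at hblock
  unfold IsBool at hbool
  rw [c_rax] at hbool
  have w_kept : RegsKept [.rsp] v v := RegsKept.refl _ _
  have w_eq : Mem.EqOn ProgX.Base.L.textLo ProgX.Base.L.textHi u₀.mem v.mem := ProgX.Base.conv_code_eqOn hcore.code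
  have hdf := (show abiInv _ from hcore.abi).1
  have hmx := (show abiInv _ from hcore.abi).2
  have hsse := ProgX.Base.sseOK_of_abiInv hcore.abi
  u_walk hcode [hμ.vendor] until [Gif.L.DGifSlurp.at_10a8ed, Gif.L.DGifSlurp.at_10a81f, Gif.L.DGifSlurp.chk14]
    span [ProgX.Base.L.textLo, ProgX.Base.L.textHi] side (v_side)
  · -- 0x10a8ed FROM 0x10a8b3: GIF_ERROR, to the epilogue with the same heap and forest
    refine ReachVia.done (Or.inr (Or.inr ⟨Hc, Fc, ?_, hcomplete⟩))
    refine sl11_at_move hat0 w_rip w_mem w_rsp (w_kept.get .rbp rfl) (w_kept.get .r14 rfl) ?_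
    refine ProgX.Base.abiInv_of ?_ ?_
    · rw [w_flags]
      simp only [X86.User.df_setStatus]
      exact hdf
    · rw [w_mxcsr]
      exact hmx
  · -- 0x10a81f FROM 0x10a8bd: `ExtData = NULL`, the record is done
    refine ReachVia.done (Or.inr (Or.inl ⟨?_, hcomplete, ?_⟩))
    · refine sl11_at_move hat0 w_rip w_mem w_rsp (w_kept.get .rbp rfl) (w_kept.get .r14 rfl) ?_
      refine ProgX.Base.abiInv_of ?_ ?_
      · rw [w_flags]
        simp only [X86.User.df_setStatus]
        exact hdf
      · rw [w_mxcsr]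
        exact hmx
    · rw [w_mem]
      omega
  · -- 0x10a8ca (chk14): GIF_OK and `ExtData ≠ NULL`: `BlockPost`'s second arm
    have hz : z.toNat = 1 := by
      rw [toNat_part32] at hbr_10a8b3
      rcases hbool with h1 | h0
      · exact h1
      · rw [h0] at hbr_10a8b3
        exact absurd (by decide) hbr_10a8b3
    have hrd : v.mem.readLE (e.reg .rsp - 88) 8 = rd v.mem ((e.reg .rsp).toNat - 88) 8 :=
      rd_eq_readLE v.mem (e.reg .rsp - 88) ((e.reg .rsp).toNat - 88) 8 (by u_omega)
    rw [hrd] at hbr_10a8bd w_rdi w_r12 w_rbx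
    have hb := hblock hz
    rcases hb with ⟨h0, _⟩ | ⟨hx, hl1, hl2, hadv⟩
    · rw [h0] at hbr_10a8bd
      exact absurd (by decide) hbr_10a8bd
    · rw [hx] at w_rdi w_r12 w_rbx
      refine ReachVia.done (Or.inl ?_)
      refine ⟨?_, hcomplete, w_rbx, w_rdi, w_r12, ?_, ?_, ?_, hlt⟩
      · refine sl11_at_move hat0 w_rip w_mem w_rsp (w_kept.get .rbp rfl) (w_kept.get .r14 rfl) ?_
        refine ProgX.Base.abiInv_of ?_ ?_
        · rw [w_flags]
          simp only [X86.User.df_setStatus]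
          exact hdf
        · rw [w_mxcsr]
          exact hmx
      · rw [w_mem]
        exact hl1
      · rw [w_mem]
        exact hl2
      · rw [w_mem]
        exact hadv

/-- **At 10A8E7H (ret22), `GifAddExtensionBlock` has returned**: `At` for the heap `H'` and the forest `F'` of its post, every
counted image complete still (`F'.saved = Fc.saved`), `eax` is 0 or 1, and the reader is below the head's measure `k`. -/
structure sl11_AtRet22 (H : Heap) (rest : List Obj) (frames : List (Nat × FrameLayout)) (F : Forest) (R : Rd) (H' : Heap)
    (F' : Forest) (m k : Nat) (u₀ e : State) (ret : Word) (v : State) : Prop where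
  at_ : DGifSlurp.At Gif.L.DGifSlurp.ret22 H rest frames F R H' F' u₀ e ret v
  complete : F'.Complete
  bool : IsBool v
  adv : rem R v.mem < k
  lt : k < m

/-- **10A8CAH (chk14) … the call of GifAddExtensionBlock … 10A8E7H (ret22)** (dgif_lib.c:1299-1303): the checked byte load of
`Buf[0]` (`bufLive`: index 0 of `Buf[256]`) into `ecx`, `rsi = gif + 88`, `rdi = gif + 80`, `r8 = r12 = pv + 89`, `edx = 0`;
`GifAddExtensionBlock` with the ghost `len = Buf[0]`; its post gives A heap and A forest (`Back2`, `SameButPend`, `rem` unchanged). -/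
theorem sl11_seg_call2 (Lay : Layout) (hLay : Lay.hi = 0x1000000) (μ : Microarch) (hμ : UserX.MicroOK μ) (u₀ : State)
    (hcode : HasCodeNat Lay u₀ Gif.L.DGifSlurp.entry Gif.Code.code_DGifSlurp.nat Gif.L.DGifSlurp.size)
    (H : Heap) (rest : List Obj) (frames : List (Nat × FrameLayout)) (F : Forest) (R : Rd) (Hc : Heap) (Fc : Forest) (m k : Nat)
    (e : State) (ret : Word)
    (h_asan_load1_noabort : Asan.SmallCheck Lay μ ProgX.Base.WayInv (ProgX.Base.CodeOK u₀) [.rax, .rdx] 1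
      ProgX.Base.L.__asan_load1_noabort.entry)
    (h_add : ∀ len : Nat, Calls Lay μ ProgX.Base.WayInv (ProgX.Base.conv u₀) Gif.L.GifAddExtensionBlock.entry
      (Gif.Spec.GifAddExtensionBlock.spec Hc rest (DGifSlurp.framesIn frames e) Fc R len))
    (v : State) (hat : sl11_AtChk14 H rest frames F R Hc Fc m k u₀ e ret v) :
    ReachVia Lay μ ProgX.Base.WayInv v (fun w => ∃ (H' : Heap) (F' : Forest),
      sl11_AtRet22 H rest frames F R H' F' m k u₀ e ret w) := by
  obtain ⟨⟨hcore, hregion, hgif, hpv, hinv, hok⟩, hcomplete, c_rbx, c_rdi, c_r12, hl1, hl2, hadv, hlt⟩ := hat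
  have he := hcore.entry
  v_entry he
  obtain ⟨henv, hrdi, hcompl0⟩ := hcore.pre
  have w_rip := hcore.rip
  have c_rsp : v.reg .rsp = e.reg .rsp - 152 := hcore.rsp
  have c_rbp : v.reg .rbp = e.reg .rdi := hcore.rbp
  have w_kept : RegsKept [.rsp] v v := RegsKept.refl _ _
  have w_eq : Mem.EqOn ProgX.Base.L.textLo ProgX.Base.L.textHi u₀.mem v.mem := ProgX.Base.conv_code_eqOn hcore.code
  have hdf := (show abiInv _ from hcore.abi).1
  have hmx := (show abiInv _ from hcore.abi).2
  have hsse := ProgX.Base.sseOK_of_abiInv hcore.abi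
  have k_r15 : v.mem.readLE (e.reg .rsp - 8) 8 = (e.reg .r15).toNat := hcore.slot_r15
  have k_r14 : v.mem.readLE (e.reg .rsp - 16) 8 = (e.reg .r14).toNat := hcore.slot_r14
  have k_r13 : v.mem.readLE (e.reg .rsp - 24) 8 = (e.reg .r13).toNat := hcore.slot_r13
  have k_r12 : v.mem.readLE (e.reg .rsp - 32) 8 = (e.reg .r12).toNat := hcore.slot_r12
  have k_rbp : v.mem.readLE (e.reg .rsp - 40) 8 = (e.reg .rbp).toNat := hcore.slot_rbp
  have k_rbx : v.mem.readLE (e.reg .rsp - 48) 8 = (e.reg .rbx).toNat := hcore.slot_rbx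
  have k_ra : UInt64.ofNat (v.mem.readLE (e.reg .rsp) 8) = ret := hcore.slot_ra
  have hsame : Mem.SameExcept
    [⟨(e.reg .rsp).toNat - 848, (e.reg .rsp).toNat⟩,
     shadowSpan ((e.reg .rsp).toNat - 152) ((e.reg .rsp).toNat - 56),
     ⟨0x800000, 0x1000020⟩,
     ⟨R.cur, R.cur + 8⟩] e.mem v.mem := hcore.same
  have hcur := henv.ctx.cursor_range henv.heap.inv.shadow
  have hbase : Hc.base = 0x800000 := hregion.1.trans henv.heap.base
  -- where gif and pv are, as numbers
  have hgin := hok.owns.inside hinv.heap (o := (Fc.gif, 120)) List.mem_cons_self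
  have hpin := hok.owns.inside hinv.heap (o := (Fc.pv, 24936)) (List.mem_cons_of_mem _ List.mem_cons_self)
  simp only at hgin hpin
  rw [hbase] at hgin hpin
  have hg1 := hgin.1
  have hg2 := hgin.2.2.2.2
  have hp1 := hpin.1
  have hp2 := hpin.2.2.2.2
  clear hgin hpin
  -- `Buf[0]` as a number `n`, the load of it as a fact
  obtain ⟨n, hn⟩ : ∃ n : Nat, n = rd v.mem (Fc.pv + 88) 1 := ⟨_, rfl⟩
  rw [← hn] at hl1 hl2 hadv
  have l_b0 : v.mem.readLE (UInt64.ofNat (Fc.pv + 88)) 1 = n := by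
    rw [hn]
    rfl
  have hadd := h_add n
  u_walk hcode [hμ.vendor] until [Gif.L.DGifSlurp.ret22] span [ProgX.Base.L.textLo, ProgX.Base.L.textHi] side (v_side)
  case check_10a8ca =>
    -- dgif_lib.c:1302 the load of `ExtData[0]` = `pv.Buf[0]`: inside the array `Buf[256]`
    have hun : ShadowUntouched v.mem s_10a8ca.mem := by v_untouched
    have hbl : LiveIn (Hc.liveObjs ++ rest) (DGifSlurp.framesIn frames e) (GifFilePrivateType.Buf_at Fc.pv 0) 1 :=
      bufLive hok.pv_live rest _ 0 1 (by decide)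
    simp only [gfield] at hbl
    exact hbl.accSmall hinv.shadow hun _ 1 (by decide) (by u_omega) (by u_omega)
  case call_inv =>
    v_inv
  case pre_10a8e2 =>
    -- GifAddExtensionBlock's PRECONDITION: the environment of the present heap and forest; only return addresses were pushed
    have hs : Mem.SameExcept [⟨(e.reg .rsp).toNat - 848, (e.reg .rsp).toNat - 152⟩] v.mem s_10a8e2.mem := by
      rw [w_mem]
      u_same
    have henv' : Env Hc rest (DGifSlurp.framesIn frames e) Fc R s_10a8e2 := by
      refine sl11_env_at_call henv hregion hinv hok hs (by omega) (by omega) ?_ ?_ ?_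
      · rw [w_rsp]
        u_omega
      · rw [w_rsp]
        u_omega
      · rw [w_rsp]
        u_omega
    refine ⟨henv', ?_, ?_, ?_, hl1, hl2, ?_, ?_⟩
    · rw [w_rdi]
      u_omega
    · rw [w_rsi]
      u_omega
    · rw [w_rcx, movzx8_toNat]
      omega
    · rw [w_r8]
      u_omega
    · rw [w_r8]
      u_omega
  -- 0x10a8e7 (ret22): GifAddExtensionBlock HAS RETURNED, with A heap `H'` and A forest `F'`
  obtain ⟨H', F', hback, hpend, hbool, hremeq⟩ := w_post
  have hs0 : Mem.SameExcept [⟨(e.reg .rsp).toNat - 848, (e.reg .rsp).toNat - 152⟩] v.mem s_10a8e2.mem := by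
    rw [w_mem_10a8e2]
    u_same
  have hrem0 : rem R s_10a8e2.mem = rem R v.mem := by
    apply rem_sameExcept hs0 (by omega)
    intro w hw
    have e := List.mem_singleton.mp hw
    rw [e]
    simp only
    omega
  have e_top : (s_10a8e2.reg .rsp).toNat + 8 = (e.reg .rsp).toNat - 152 := by
    rw [w_rsp_10a8e2]
    u_omega
  -- the callee's footprint in terms of `v`
  v_after_call w_rsp_10a8e2 w_mem_10a8e2
  -- the slots and the return address: over the pushed return address, then through the callee's footprint
  have hp15 : s_10a8e2.mem.readLE (e.reg .rsp - 8) 8 = (e.reg .r15).toNat := by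
    rw [w_mem_10a8e2]
    u_frame k_r15
  rw [w_mem_10a8e2] at hp15
  have hs15 : s_10a8e2r.mem.readLE (e.reg .rsp - 8) 8 = (e.reg .r15).toNat := by u_frame hp15
  have hp14 : s_10a8e2.mem.readLE (e.reg .rsp - 16) 8 = (e.reg .r14).toNat := by
    rw [w_mem_10a8e2]
    u_frame k_r14
  rw [w_mem_10a8e2] at hp14
  have hs14 : s_10a8e2r.mem.readLE (e.reg .rsp - 16) 8 = (e.reg .r14).toNat := by u_frame hp14
  have hp13 : s_10a8e2.mem.readLE (e.reg .rsp - 24) 8 = (e.reg .r13).toNat := by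
    rw [w_mem_10a8e2]
    u_frame k_r13
  rw [w_mem_10a8e2] at hp13
  have hs13 : s_10a8e2r.mem.readLE (e.reg .rsp - 24) 8 = (e.reg .r13).toNat := by u_frame hp13
  have hp12 : s_10a8e2.mem.readLE (e.reg .rsp - 32) 8 = (e.reg .r12).toNat := by
    rw [w_mem_10a8e2]
    u_frame k_r12
  rw [w_mem_10a8e2] at hp12
  have hs12 : s_10a8e2r.mem.readLE (e.reg .rsp - 32) 8 = (e.reg .r12).toNat := by u_frame hp12
  have hpbp : s_10a8e2.mem.readLE (e.reg .rsp - 40) 8 = (e.reg .rbp).toNat := by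
    rw [w_mem_10a8e2]
    u_frame k_rbp
  rw [w_mem_10a8e2] at hpbp
  have hsbp : s_10a8e2r.mem.readLE (e.reg .rsp - 40) 8 = (e.reg .rbp).toNat := by u_frame hpbp
  have hpbx : s_10a8e2.mem.readLE (e.reg .rsp - 48) 8 = (e.reg .rbx).toNat := by
    rw [w_mem_10a8e2]
    u_frame k_rbx
  rw [w_mem_10a8e2] at hpbx
  have hsbx : s_10a8e2r.mem.readLE (e.reg .rsp - 48) 8 = (e.reg .rbx).toNat := by u_frame hpbx
  have hpra : UInt64.ofNat (s_10a8e2.mem.readLE (e.reg .rsp) 8) = ret := by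
    rw [w_mem_10a8e2]
    u_frame k_ra
  rw [w_mem_10a8e2] at hpra
  have hsra : UInt64.ofNat (s_10a8e2r.mem.readLE (e.reg .rsp) 8) = ret := by u_frame hpra
  -- the footprint since the entry
  have hsame1 : Mem.SameExcept
    [⟨(e.reg .rsp).toNat - 848, (e.reg .rsp).toNat⟩,
     shadowSpan ((e.reg .rsp).toNat - 152) ((e.reg .rsp).toNat - 56),
     ⟨0x800000, 0x1000020⟩,
     ⟨R.cur, R.cur + 8⟩] e.mem s_10a8e2r.mem := by u_same
  have hinv1 : HeapInv H' rest (DGifSlurp.framesIn frames e) ((e.reg .rsp).toNat - 152) s_10a8e2r.mem := by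
    rw [← e_top]
    exact hback.inv
  obtain ⟨pgif, ppv, _, _, psaved⟩ := hpend
  have hcore1 : DGifSlurp.Core Gif.L.DGifSlurp.ret22 H rest frames F R u₀ e ret s_10a8e2r := {
    entry := hcore.entry
    pre := hcore.pre
    rip := w_rip
    rsp := w_rsp
    rbp := (w_kept.get .rbp rfl).trans c_rbp
    r14 := (w_kept.get .r14 rfl).trans hcore.r14
    slot_r15 := hs15
    slot_r14 := hs14
    slot_r13 := hs13
    slot_r12 := hs12
    slot_rbp := hsbp
    slot_rbx := hsbx
    slot_ra := hsra
    rem := by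
      have h2 := hcore.rem
      omega
    same := hsame1
    code := w_code
    abi := w_inv
  }
  refine ReachVia.done ⟨H', F', ?_⟩
  exact {
    at_ := ⟨hcore1, hregion.trans hback.region, pgif.trans hgif, ppv.trans hpv, hinv1, hback.ok⟩
    complete := by
      unfold Forest.Complete
      rw [psaved]
      exact hcomplete
    bool := hbool
    adv := by
      omega
    lt := hlt
  }

/-- **10A8E7H (ret22) … 10A8A2H | 10A8EDH** (dgif_lib.c:1299-1304): `ebx = eax`; GIF_ERROR: to the epilogue; GIF_OK (`jne`): back
to the head of the sub-block loop with the heap and forest of GifAddExtensionBlock's post and the measure `rem R w.mem < k`. No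
store. -/
theorem sl11_seg_tail (Lay : Layout) (hLay : Lay.hi = 0x1000000) (μ : Microarch) (hμ : UserX.MicroOK μ) (u₀ : State)
    (hcode : HasCodeNat Lay u₀ Gif.L.DGifSlurp.entry Gif.Code.code_DGifSlurp.nat Gif.L.DGifSlurp.size)
    (H : Heap) (rest : List Obj) (frames : List (Nat × FrameLayout)) (F : Forest) (R : Rd) (H' : Heap) (F' : Forest) (m k : Nat)
    (e : State) (ret : Word)
    (v : State) (hat : sl11_AtRet22 H rest frames F R H' F' m k u₀ e ret v) :
    ReachVia Lay μ ProgX.Base.WayInv v (fun w =>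
      (∃ (H'' : Heap) (F'' : Forest) (k' : Nat), k' < k ∧ DGifSlurp.ExtHead H rest frames F R H'' F'' m k' u₀ e ret w) ∨
      DGifSlurp.Exit H rest frames F R u₀ e ret w) := by
  obtain ⟨hat0, hcomplete, hbool, hadv, hlt⟩ := hat
  have hcore := hat0.core
  have he := hcore.entry
  v_entry he
  have w_rip := hcore.rip
  have c_rsp : v.reg .rsp = e.reg .rsp - 152 := hcore.rsp
  obtain ⟨z, c_rax⟩ : ∃ z, v.reg .rax = z := ⟨_, rfl⟩
  have w_kept : RegsKept [.rsp] v v := RegsKept.refl _ _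
  have w_eq : Mem.EqOn ProgX.Base.L.textLo ProgX.Base.L.textHi u₀.mem v.mem := ProgX.Base.conv_code_eqOn hcore.code
  have hdf := (show abiInv _ from hcore.abi).1
  have hmx := (show abiInv _ from hcore.abi).2
  have hsse := ProgX.Base.sseOK_of_abiInv hcore.abi
  u_walk hcode [hμ.vendor] until [Gif.L.DGifSlurp.at_10a8a2, Gif.L.DGifSlurp.at_10a8ed]
    span [ProgX.Base.L.textLo, ProgX.Base.L.textHi] side (v_side)
  · -- 0x10a8a2 FROM 0x10a8eb: GIF_OK, back to the head of the sub-block loop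
    refine ReachVia.done (Or.inl ⟨H', F', rem R s_10a8eb.mem, ?_, ?_, hcomplete, rfl, ?_⟩)
    · rw [w_mem]
      exact hadv
    · refine sl11_at_move hat0 w_rip w_mem w_rsp (w_kept.get .rbp rfl) (w_kept.get .r14 rfl) ?_
      refine ProgX.Base.abiInv_of ?_ ?_
      · rw [w_flags]
        simp only [X86.User.df_setStatus]
        exact hdf
      · rw [w_mxcsr]
        exact hmx
    · rw [w_mem]
      omega
  · -- 0x10a8ed FROM 0x10a8eb: GIF_ERROR, to the epilogue with the heap and forest of the post
    refine ReachVia.done (Or.inr ⟨H', F', ?_, hcomplete⟩)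
    refine sl11_at_move hat0 w_rip w_mem w_rsp (w_kept.get .rbp rfl) (w_kept.get .r14 rfl) ?_
    refine ProgX.Base.abiInv_of ?_ ?_
    · rw [w_flags]
      simp only [X86.User.df_setStatus]
      exact hdf
    · rw [w_mxcsr]
      exact hmx

end Gif.Spec.DGifSlurp_11
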